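-- pv_equiv track=rewrite | github.com/ShuklaA11/waymo-detection | waymo_pipeline/event_detector.py | _find_contiguous_segments
-- ===== SOURCE A (Python) =====
-- def _find_contiguous_segments(
--     frame_nums: list[int],
--     gap_tolerance: int,
-- ) -> list[tuple[int, int]]:
--     """
--     Find contiguous segments in a sorted list of frame numbers.
--     Merges segments separated by gaps <= gap_tolerance.
--
--     Returns list of (start_frame, end_frame) tuples.
--     """
--     if not frame_nums:
--         return []
--
--     segments = []
--     seg_start = frame_nums[0]
--     seg_end = frame_nums[0]
--
--     for fn in frame_nums[1:]:
--         if fn - seg_end <= gap_tolerance: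
--             seg_end = fn
--         else:
--             segments.append((seg_start, seg_end))
--             seg_start = fn
--             seg_end = fn
--
--     segments.append((seg_start, seg_end))
--     return segments
-- ===== SOURCE B (Python) =====
-- def _find_contiguous_segments(
--     frame_nums: list[int],
--     gap_tolerance: int,
-- ) -> list[tuple[int, int]]:
--     """Build the segments back-to-front in a single reverse pass."""
--     result = []
--     for fn in reversed(frame_nums):
--         if result and result[0][0] - fn <= gap_tolerance:
--             result[0] = (fn, result[0][1])
--         else:
--             result.insert(0, (fn, fn))
--     return result
-- ===== Notes on version B (the rewrite author's own statement) =====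
-- stated objective: alternative
-- what changed: Instead of a forward scan carrying (seg_start, seg_end) state plus a final flush append, B iterates the list in reverse and builds the output back-to-front: each frame either extends the start of the first already-built segment or prepends a new singleton segment, so no pending-segment state or final append exists.
import Mathlib
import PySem

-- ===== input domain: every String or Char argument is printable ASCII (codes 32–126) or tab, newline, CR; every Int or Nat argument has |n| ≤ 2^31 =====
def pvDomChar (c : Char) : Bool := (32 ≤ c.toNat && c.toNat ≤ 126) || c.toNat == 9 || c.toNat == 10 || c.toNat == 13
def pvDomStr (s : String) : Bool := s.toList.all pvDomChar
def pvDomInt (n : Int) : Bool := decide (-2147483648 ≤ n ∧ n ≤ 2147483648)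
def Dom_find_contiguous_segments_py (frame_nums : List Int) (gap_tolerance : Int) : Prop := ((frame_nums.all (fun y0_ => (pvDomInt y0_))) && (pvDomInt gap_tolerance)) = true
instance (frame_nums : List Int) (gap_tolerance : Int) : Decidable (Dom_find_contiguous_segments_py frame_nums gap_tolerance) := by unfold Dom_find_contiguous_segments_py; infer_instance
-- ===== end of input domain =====

-- B replaces A's forward scan with pending (seg_start, seg_end) state by a reverse pass that
-- builds the output back-to-front (objective: alternative decomposition, same O(n) cost).

-- ===== PORT A =====
-- A: guard on empty, then a forward loop over frame_nums[1:] carrying (segments, seg_start, seg_end),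
-- with a final append of the pending segment.
def find_contiguous_segments_py (frame_nums : List Int) (gap_tolerance : Int) : List (Int × Int) :=
  match frame_nums with
  | [] => []
  | f0 :: rest =>
    let r := rest.foldl (fun (st : List (Int × Int) × Int × Int) fn =>
        if fn - st.2.2 ≤ gap_tolerance then (st.1, st.2.1, fn)
        else (st.1 ++ [(st.2.1, st.2.2)], fn, fn)) ([], f0, f0)
    r.1 ++ [(r.2.1, r.2.2)]

-- ===== PORT B =====
-- B: 'for fn in reversed(frame_nums)' building result back-to-front = a foldr; 'result[0] = ...'
-- rewrites the head, 'result.insert(0, ...)' is cons; Python's 'result and ...' guard is the [] case.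
def find_contiguous_segments_py_alt (frame_nums : List Int) (gap_tolerance : Int) : List (Int × Int) :=
  frame_nums.foldr (fun fn result =>
    match result with
    | (s, e) :: rest =>
      if s - fn ≤ gap_tolerance then (fn, e) :: rest else (fn, fn) :: (s, e) :: rest
    | [] => [(fn, fn)]) []

-- ===== PRECONDITION & SPEC =====
def Spec_find_contiguous_segments_py (frame_nums : List Int) (gap_tolerance : Int) (out : List (Int × Int)) : Prop := out = find_contiguous_segments_py_alt frame_nums gap_tolerance
instance (frame_nums : List Int) (gap_tolerance : Int) (out : List (Int × Int)) : Decidable (Spec_find_contiguous_segments_py frame_nums gap_tolerance out) := by unfold Spec_find_contiguous_segments_py; infer_instance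

-- ===== CLAIM (what is proved, stated in full; the proofs are below) =====
def Claim_equal_find_contiguous_segments_py : Prop := ∀ (frame_nums : List Int) (gap_tolerance : Int), Dom_find_contiguous_segments_py frame_nums gap_tolerance → Spec_find_contiguous_segments_py frame_nums gap_tolerance (find_contiguous_segments_py frame_nums gap_tolerance)

-- ===== LEMMAS AND PROOFS =====

-- Reference recursion: segments of xs continuing a pending segment (s, e).
def segsGo (g s e : Int) (xs : List Int) : List (Int × Int) :=
  match xs with
  | [] => [(s, e)]
  | f :: rs => if f - e ≤ g then segsGo g s f rs else (s, e) :: segsGo g f f rs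

theorem foldA_eq_segsGo (g : Int) (xs : List Int) :
    ∀ (acc : List (Int × Int)) (s e : Int),
      (let r := xs.foldl (fun (st : List (Int × Int) × Int × Int) fn =>
          if fn - st.2.2 ≤ g then (st.1, st.2.1, fn)
          else (st.1 ++ [(st.2.1, st.2.2)], fn, fn)) (acc, s, e)
       r.1 ++ [(r.2.1, r.2.2)]) = acc ++ segsGo g s e xs := by
  induction xs with
  | nil => intro acc s e; simp [segsGo]
  | cons f rs ih =>
    intro acc s e
    simp only [List.foldl_cons, segsGo]
    split_ifs with h
    · exact ih acc s f
    · rw [ih (acc ++ [(s, e)]) f f]; simp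

theorem altB_segsGo (g : Int) (xs : List Int) :
    ∀ s e : Int, ∃ t rest,
      find_contiguous_segments_py_alt (e :: xs) g = (e, t) :: rest ∧
      segsGo g s e xs = (s, t) :: rest := by
  induction xs with
  | nil => intro s e; exact ⟨e, [], by simp [find_contiguous_segments_py_alt, segsGo]⟩
  | cons f rs ih =>
    intro s e
    simp only [segsGo]
    by_cases h : f - e ≤ g
    · obtain ⟨t, rest, hB, hG⟩ := ih s f
      refine ⟨t, rest, ?_, by simp [h, hG]⟩
      simp only [find_contiguous_segments_py_alt, List.foldr_cons] at hB ⊢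
      rw [hB]; simp [h]
    · obtain ⟨t, rest, hB, hG⟩ := ih f f
      refine ⟨e, (f, t) :: rest, ?_, by simp [h, hG]⟩
      simp only [find_contiguous_segments_py_alt, List.foldr_cons] at hB ⊢
      rw [hB]; simp [h]

-- ===== VERDICT (by name: the statement is the Claim_ definition above) =====
theorem find_contiguous_segments_py_spec : Claim_equal_find_contiguous_segments_py := by
  intro frame_nums g _
  unfold Spec_find_contiguous_segments_py
  cases frame_nums with
  | nil => rfl
  | cons h t =>
    obtain ⟨tt, rest, hB, hG⟩ := altB_segsGo g t h h
    have hA := foldA_eq_segsGo g t [] h h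
    simp only [find_contiguous_segments_py]
    rw [hA, hB, hG]
    simp
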